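-- pv_equiv track=rewrite | github.com/Ry17-Illinois/UIUC.DigitalHumanitiesToolkit | main.py | get_folder_key
-- ===== SOURCE A (Python) =====
-- def get_folder_key(file_path):
--     """Extract folder key for grouping files by folder"""
--     path_parts = file_path.replace('\\', '/').split('/')
--
--     # Work backwards to find collection/box/folder structure
--     folder_parts = []
--     for i in range(len(path_parts) - 1, 0, -1):  # Skip filename
--         part = path_parts[i]
--         folder_parts.insert(0, part)
--
--         # Stop when we have enough context (3 levels: collection/box/folder)
--         if len(folder_parts) >= 3:
--             break
--
--     return '/'.join(folder_parts).lower()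
-- ===== SOURCE B (Python) =====
-- def get_folder_key(file_path):
--     """Extract folder key for grouping files by folder"""
--     return '/'.join(file_path.replace('\\', '/').rsplit('/', 3)[1:]).lower()
-- ===== Notes on version B (the rewrite author's own statement) =====
-- stated objective: simpler
-- what changed: Replaces the full split plus backward insert(0)/break loop by a single right-split with maxsplit 3 whose first chunk is dropped: the right-split peels off at most the last three components directly, and dropping the first chunk both removes the merged head (when there are more than three separators) and skips index 0 (when there are fewer).
import Mathlib
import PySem

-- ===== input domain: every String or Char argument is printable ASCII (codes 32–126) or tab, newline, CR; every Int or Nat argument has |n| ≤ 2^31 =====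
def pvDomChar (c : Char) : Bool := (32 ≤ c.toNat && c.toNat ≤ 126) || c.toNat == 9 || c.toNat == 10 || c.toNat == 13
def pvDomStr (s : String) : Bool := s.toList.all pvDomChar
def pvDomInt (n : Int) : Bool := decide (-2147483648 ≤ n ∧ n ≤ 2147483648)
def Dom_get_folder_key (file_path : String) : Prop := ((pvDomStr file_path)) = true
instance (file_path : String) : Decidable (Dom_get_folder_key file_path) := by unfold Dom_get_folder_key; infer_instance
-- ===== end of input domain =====

-- B replaces A's full split + backward insert(0)/break loop by a single right-split rsplit('/', 3)
-- whose first chunk is dropped (simpler, one line).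

-- ===== PORT A =====
-- the backward loop 'for i in range(len-1, 0, -1)' with break; the index i is always
-- in range here, so pyGetD with a dummy default is exact for path_parts[i]
def pvLoopA (parts : List String) : List Int → List String → List String
  | [], acc => acc
  | i :: rest, acc =>
      let part := PySem.List.pyGetD parts i ""
      let acc' := PySem.List.insert acc 0 part
      if 3 ≤ acc'.length then acc' else pvLoopA parts rest acc'

-- the separator "/" is a nonempty literal, so Python's split never raises: split? is
-- always 'some' here and '.getD []' is exact
def get_folder_key (file_path : String) : String :=
  let path_parts := (PySem.Str.split? (PySem.Str.replace file_path "\\" "/") "/").getD []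
  let folder_parts := pvLoopA path_parts
    (PySem.List.pyRange ((path_parts.length : Int) - 1) 0 (-1)) []
  PySem.Str.lower (PySem.Str.join "/" folder_parts)

-- ===== PORT B =====
-- PySem has no rsplit-with-maxsplit, so str.rsplit(sep, maxsplit) is hand-ported for the
-- single nonempty separator Source B uses: each step splits the string at the LAST occurrence
-- of the separator (exactly what CPython's rsplit does right-to-left), at most m times.
def pvSplitLast (c : Char) : List Char → Option (List Char × List Char)
  | [] => none
  | x :: xs =>
      match pvSplitLast c xs with
      | some (a, b) => some (x :: a, b)
      | none => if x = c then some ([], xs) else none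

-- s.rsplit(c, m): exact for a single-char separator
def pvRsplit (c : Char) : Nat → List Char → List (List Char)
  | 0, cs => [cs]
  | m + 1, cs =>
      match pvSplitLast c cs with
      | none => [cs]
      | some (a, b) => pvRsplit c m a ++ [b]

def get_folder_key_alt (file_path : String) : String :=
  let chunks := pvRsplit '/' 3 (PySem.Str.replace file_path "\\" "/").toList
  String.ofList (PySem.Chars.lower
    (PySem.Chars.join ['/'] (PySem.List.slice chunks (some 1) none)))

-- ===== PRECONDITION & SPEC =====
def Spec_get_folder_key (file_path : String) (out : String) : Prop := out = get_folder_key_alt file_path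
instance (file_path : String) (out : String) : Decidable (Spec_get_folder_key file_path out) := by unfold Spec_get_folder_key; infer_instance

-- ===== CLAIM (what is proved, stated in full; the proofs are below) =====
def Claim_equal_get_folder_key : Prop := ∀ (file_path : String), Dom_get_folder_key file_path → Spec_get_folder_key file_path (get_folder_key file_path)

-- ===== LEMMAS AND PROOFS =====

-- ---- A side: the backward loop is 'drop (max 1 (len - 3))' ----
lemma pvLoopA_spec (parts : List String) :
    ∀ (i : Nat) (acc : List String), i < parts.length → acc.length < 3 →
      pvLoopA parts (PySem.List.pyRange (i : Int) 0 (-1)) acc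
        = (parts.drop (max 1 (i - (2 - acc.length)))).take
            (i + 1 - max 1 (i - (2 - acc.length))) ++ acc := by
  intro i
  induction i with
  | zero =>
      intro acc hi ha
      rw [PySem.List.pyRange_neg_one_eq_nil (by omega)]
      simp [pvLoopA]
  | succ i ih =>
      intro acc hi ha
      rw [PySem.List.pyRange_neg_one_cons (by omega)]
      have hstep : ((i + 1 : Nat) : Int) - 1 = (i : Int) := by push_cast; ring
      have hidx : PySem.List.pyGetD parts ((i + 1 : Nat) : Int) "" = parts[i + 1] := by
        rw [PySem.List.pyGetD_eq_getElem parts "" (by omega) (by exact_mod_cast hi)]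
        simp
      simp only [pvLoopA, hstep, hidx, PySem.List.insert_zero]
      by_cases h3 : 3 ≤ (parts[i + 1] :: acc).length
      · rw [if_pos h3]
        have ha2 : acc.length = 2 := by simp at h3 ⊢; omega
        have hj : max 1 (i + 1 - (2 - acc.length)) = i + 1 := by omega
        have h1 : i + 1 + 1 - (i + 1) = 1 := by omega
        rw [hj, h1, List.take_one_drop_eq_of_lt_length hi]
        rfl
      · rw [if_neg h3]
        have hlt : (parts[i + 1] :: acc).length < 3 := by omega
        have hle1 : acc.length ≤ 1 := by simp at h3 ⊢; omega
        rw [ih _ (by omega) hlt]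
        have hjeq : max 1 (i - (2 - (parts[i + 1] :: acc).length))
            = max 1 (i + 1 - (2 - acc.length)) := by simp; omega
        rw [hjeq]
        set j := max 1 (i + 1 - (2 - acc.length)) with hjdef
        have hjle : j ≤ i + 1 := by omega
        have hsucc : i + 1 + 1 - j = (i + 1 - j) + 1 := by omega
        have hget : (parts.drop j)[i + 1 - j]? = some parts[i + 1] := by
          rw [List.getElem?_drop]
          have : j + (i + 1 - j) = i + 1 := by omega
          rw [this, List.getElem?_eq_getElem hi]
        rw [hsucc, List.take_add_one, hget]
        simp

lemma pvLoopA_eq_drop (parts : List String) :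
    pvLoopA parts (PySem.List.pyRange ((parts.length : Int) - 1) 0 (-1)) []
      = parts.drop (max 1 (parts.length - 3)) := by
  rcases parts with _ | ⟨x, xs⟩
  · have e1 : ((([] : List String).length : Int)) - 1 ≤ 0 := by simp
    rw [PySem.List.pyRange_neg_one_eq_nil e1]
    simp [pvLoopA]
  · have hlen : ((x :: xs).length : Int) - 1 = (((x :: xs).length - 1 : Nat) : Int) := by
      simp
    rw [hlen, pvLoopA_spec (x :: xs) ((x :: xs).length - 1) [] (by simp) (by simp)]
    have hnat : max 1 ((x :: xs).length - 3)
        = max 1 ((x :: xs).length - 1 - (2 - ([] : List String).length)) := by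
      simp only [List.length_nil, List.length_cons]
      omega
    rw [← hnat]
    set k := max 1 ((x :: xs).length - 3) with hk
    have hkle : k ≤ (x :: xs).length := by
      have : (1:Nat) ≤ (x :: xs).length := by simp
      simp only [hk]
      omega
    have htake : (x :: xs).length - 1 + 1 - k = ((x :: xs).drop k).length := by
      simp only [List.length_drop, List.length_cons]
      omega
    rw [htake, List.take_length, List.append_nil]

-- ---- PySem's fuel-based splitOn is Mathlib's List.splitOn (single-char separator) ----
lemma pv_modifyHead_self {α : Type} (l : List α) : l.modifyHead (fun x => x) = l := by
  cases l <;> rfl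

lemma pv_splitOn_go_spec (c : Char) :
    ∀ (l : List Char) (fuel : Nat) (cur : List Char) (acc : List (List Char)),
      l.length < fuel →
      PySem.Chars.splitOn.go [c] fuel l cur acc
        = acc.reverse ++ (l.splitOnP (· == c)).modifyHead (cur.reverse ++ ·) := by
  intro l
  induction l with
  | nil =>
      intro fuel cur acc h
      match fuel, h with
      | fuel + 1, _ =>
        simp [PySem.Chars.splitOn.go, List.splitOnP_nil]
  | cons x rest ih =>
      intro fuel cur acc h
      match fuel, h with
      | fuel + 1, h =>
        rw [PySem.Chars.splitOn.go]
        by_cases hx : x = c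
        · subst hx
          have hpre : [x].isPrefixOf (x :: rest) = true := by simp [List.isPrefixOf]
          rw [if_pos hpre]
          have : List.drop [x].length (x :: rest) = rest := by simp
          rw [this, ih fuel [] _ (by simpa using h)]
          simp [List.splitOnP_cons, pv_modifyHead_self]
        · have hpre : [c].isPrefixOf (x :: rest) = false := by
            simp [List.isPrefixOf]
            exact fun hc => (hx hc.symm).elim
          rw [if_neg (by simp [hpre])]
          rw [ih fuel (x :: cur) acc (by simpa using h)]
          have hbeq : (x == c) = false := by simp [hx]
          simp [List.splitOnP_cons, hbeq, List.modifyHead_modifyHead, Function.comp_def]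

lemma pv_splitOn_eq (l : List Char) (c : Char) :
    PySem.Chars.splitOn l [c] = l.splitOn c := by
  rw [PySem.Chars.splitOn, pv_splitOn_go_spec c l (l.length + 1) [] [] (by omega)]
  simp only [List.reverse_nil, List.nil_append, List.splitOn]
  simp [pv_modifyHead_self]

-- ---- splitOn structure lemmas ----
lemma pv_splitOn_not_mem {c : Char} {l : List Char} (h : c ∉ l) : l.splitOn c = [l] := by
  induction l with
  | nil => simp [List.splitOn, List.splitOnP_nil]
  | cons x xs ih =>
      simp only [List.mem_cons, not_or] at h
      have hx : (x == c) = false := by simp; exact fun hxc => h.1 hxc.symm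
      have := ih h.2
      simp only [List.splitOn] at this ⊢
      simp [List.splitOnP_cons, hx, this]

lemma pv_splitOn_append (a b : List Char) (c : Char) :
    (a ++ c :: b).splitOn c = a.splitOn c ++ b.splitOn c := by
  induction a with
  | nil => simp [List.splitOn, List.splitOnP_cons]
  | cons x a' ih =>
      simp only [List.splitOn] at ih ⊢
      by_cases hx : x = c
      · simp [List.splitOnP_cons, hx, ih]
      · have hbeq : (x == c) = false := by simp [hx]
        simp only [List.cons_append, List.splitOnP_cons, hbeq, Bool.false_eq_true,
          if_false, ih]
        rcases hsp : a'.splitOnP (· == c) with _ | ⟨p, ps⟩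
        · exact absurd hsp (List.splitOnP_ne_nil _ _)
        · simp

-- ---- pvSplitLast spec ----
lemma pvSplitLast_none {c : Char} {l : List Char} (h : pvSplitLast c l = none) : c ∉ l := by
  induction l with
  | nil => simp
  | cons x xs ih =>
      simp only [pvSplitLast] at h
      rcases hsp : pvSplitLast c xs with _ | ⟨a, b⟩
      · rw [hsp] at h
        simp only at h
        split_ifs at h with hx
        simp only [List.mem_cons, not_or]
        exact ⟨fun hxc => hx hxc.symm, ih hsp⟩
      · rw [hsp] at h
        simp at h

lemma pvSplitLast_some {c : Char} :
    ∀ {l a b : List Char}, pvSplitLast c l = some (a, b) → l = a ++ c :: b ∧ c ∉ b := by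
  intro l
  induction l with
  | nil => intro a b h; simp [pvSplitLast] at h
  | cons x xs ih =>
      intro a b h
      simp only [pvSplitLast] at h
      rcases hsp : pvSplitLast c xs with _ | ⟨a', b'⟩
      · rw [hsp] at h
        simp only at h
        split_ifs at h with hx
        simp only [Option.some_inj, Prod.mk.injEq] at h
        obtain ⟨ha, hb⟩ := h
        subst hx
        constructor
        · rw [← ha, ← hb]; simp
        · rw [← hb]; exact pvSplitLast_none hsp
      · rw [hsp] at h
        simp only [Option.some_inj, Prod.mk.injEq] at h
        obtain ⟨ha, hb⟩ := h
        obtain ⟨hxs, hcb⟩ := ih hsp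
        subst hb
        constructor
        · rw [← ha, hxs]; simp
        · exact hcb

-- ---- the rsplit characterisation ----
lemma pvRsplit_spec (c : Char) :
    ∀ (m : Nat) (cs : List Char),
      pvRsplit c m cs
        = [c].intercalate ((cs.splitOn c).take ((cs.splitOn c).length - min m ((cs.splitOn c).length - 1)))
            :: (cs.splitOn c).drop ((cs.splitOn c).length - min m ((cs.splitOn c).length - 1)) := by
  intro m
  induction m with
  | zero =>
      intro cs
      simp [pvRsplit, List.intercalate_splitOn]
  | succ m ih =>
      intro cs
      rw [pvRsplit]
      rcases hsp : pvSplitLast c cs with _ | ⟨a, b⟩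
      · have hps : cs.splitOn c = [cs] := pv_splitOn_not_mem (pvSplitLast_none hsp)
        simp [hps, List.intercalate]
      · obtain ⟨hcs, hcb⟩ := pvSplitLast_some hsp
        subst hcs
        show pvRsplit c m a ++ [b] = _
        have hps : (a ++ c :: b).splitOn c = a.splitOn c ++ [b] := by
          rw [pv_splitOn_append, pv_splitOn_not_mem hcb]
        set qs := a.splitOn c with hqs
        have hq1 : 1 ≤ qs.length := by
          rcases hq : qs with _ | _
          · exact absurd hq (by simpa [hqs, List.splitOn] using List.splitOnP_ne_nil _ _)
          · simp
        rw [ih a, hps]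
        have hlen : (qs ++ [b]).length = qs.length + 1 := by simp
        have hk : (qs ++ [b]).length - min (m + 1) ((qs ++ [b]).length - 1)
            = qs.length - min m (qs.length - 1) := by
          simp only [hlen]
          omega
        have hle : qs.length - min m (qs.length - 1) ≤ qs.length := by omega
        rw [hk, List.take_append_of_le_length hle, List.drop_append_of_le_length hle]
        simp
        exact ⟨rfl, rfl⟩

-- ---- glue: the Str-level parts list maps onto splitOn ----
lemma pv_parts_map (s : String) :
    ((PySem.Str.split? s "/").getD []).map String.toList = s.toList.splitOn '/' := by
  have hb := PySem.Str.split?_map s "/"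
  have hsep : ("/" : String).toList = ['/'] := by decide
  rw [hsep] at hb
  have hcs : PySem.Chars.split? s.toList ['/'] = some (s.toList.splitOn '/') := by
    rw [PySem.Chars.split?]
    simp [pv_splitOn_eq]
  rw [hcs] at hb
  rcases hsp : PySem.Str.split? s "/" with _ | ps
  · rw [hsp] at hb; simp at hb
  · rw [hsp] at hb
    simp only [Option.map_some, Option.some_inj] at hb
    simpa using hb

-- ===== VERDICT (by name: the statement is the Claim_ definition above) =====
theorem get_folder_key_spec : Claim_equal_get_folder_key := by
  intro file_path _
  unfold Spec_get_folder_key get_folder_key get_folder_key_alt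
  simp only [pvLoopA_eq_drop, pvRsplit_spec, PySem.List.slice_from_one, List.tail_cons]
  set s := PySem.Str.replace file_path "\\" "/" with hs
  set parts := (PySem.Str.split? s "/").getD [] with hparts
  set ps := s.toList.splitOn '/' with hps
  have hmap : parts.map String.toList = ps := pv_parts_map s
  have hlen : parts.length = ps.length := by rw [← hmap]; simp
  have hq1 : 1 ≤ ps.length := by
    rcases hq : ps with _ | _
    · exact absurd hq (by simpa [hps, List.splitOn] using List.splitOnP_ne_nil _ _)
    · simp
  have hidx : ps.length - min 3 (ps.length - 1) = max 1 (parts.length - 3) := by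
    rw [hlen]; omega
  rw [hidx]
  have hsep : ("/" : String).toList = ['/'] := by decide
  have hlist : (PySem.Str.lower (PySem.Str.join "/" (List.drop (max 1 (parts.length - 3)) parts))).toList
      = PySem.Chars.lower (PySem.Chars.join ['/'] (List.drop (max 1 (parts.length - 3)) ps)) := by
    rw [PySem.Str.toList_lower, PySem.Str.toList_join, hsep, List.map_drop, hmap]
  exact String.ofList_toList.symm.trans (congrArg String.ofList hlist)
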